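-- pv_equiv track=rewrite | github.com/jluby127/AstroQ | mappingFunctions.py | buildAllocationMapSingleNight
-- ===== SOURCE A (Python) =====
-- def buildAllocationMapSingleNight(An, AvailableSlotsInTheNight, twilightMapNight):
--     # An (list) = The allocation plan for a single night, 4 elements long and filled with 1's and 0's indicating which quarters are allocated or not.
--     extra = AvailableSlotsInTheNight%4
--     AvailableSlotsInTheQuarter = int(AvailableSlotsInTheNight/4)
--     edge = int((len(twilightMapNight) - AvailableSlotsInTheNight)/2)
--
--     allomap = [0]*len(twilightMapNight) #.copy()
--     for i in range(len(An)):
--         if An[i] == 1: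
--             start = edge + i*int(AvailableSlotsInTheQuarter)
--             stop = start + int(AvailableSlotsInTheQuarter)
--             for j in range(start, stop):
--                 allomap[j] = 1
--         else:
--             start = edge + i*AvailableSlotsInTheQuarter
--             stop = start + AvailableSlotsInTheQuarter
--             if i == 3: # prevent the last slot from being scheduled (one too many)
--                 stop -= 1
--             for j in range(start, stop):
--                 allomap[j] = 0
--     return allomap
-- ===== SOURCE B (Python) =====
-- def buildAllocationMapSingleNight(An, AvailableSlotsInTheNight, twilightMapNight):
--     # Single per-position pass: a slot is 1 iff it falls in the centred allocated
--     # band [edge, edge+len(An)*q) and its quarter is marked 1 in An.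
--     q = int(AvailableSlotsInTheNight/4)
--     edge = int((len(twilightMapNight) - AvailableSlotsInTheNight)/2)
--     hi = edge + len(An)*q
--     return [0 if (q <= 0 or j < edge or j >= hi)
--             else (1 if An[(j-edge)//q] == 1 else 0)
--             for j in range(len(twilightMapNight))]
-- ===== Notes on version B (the rewrite author's own statement) =====
-- stated objective: simpler
-- what changed: Replaces the four quarter slice-fill loops (with a dead zero-writing else branch and its i==3 stop adjustment) by a single list comprehension over output positions that decides each slot directly from its quarter index (j-edge)//q.
-- outside the precondition, e.g. on buildAllocationMapSingleNight([1], 4, [0, 0]): A returns [0, 1], B returns [0, 0]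
import Mathlib
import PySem

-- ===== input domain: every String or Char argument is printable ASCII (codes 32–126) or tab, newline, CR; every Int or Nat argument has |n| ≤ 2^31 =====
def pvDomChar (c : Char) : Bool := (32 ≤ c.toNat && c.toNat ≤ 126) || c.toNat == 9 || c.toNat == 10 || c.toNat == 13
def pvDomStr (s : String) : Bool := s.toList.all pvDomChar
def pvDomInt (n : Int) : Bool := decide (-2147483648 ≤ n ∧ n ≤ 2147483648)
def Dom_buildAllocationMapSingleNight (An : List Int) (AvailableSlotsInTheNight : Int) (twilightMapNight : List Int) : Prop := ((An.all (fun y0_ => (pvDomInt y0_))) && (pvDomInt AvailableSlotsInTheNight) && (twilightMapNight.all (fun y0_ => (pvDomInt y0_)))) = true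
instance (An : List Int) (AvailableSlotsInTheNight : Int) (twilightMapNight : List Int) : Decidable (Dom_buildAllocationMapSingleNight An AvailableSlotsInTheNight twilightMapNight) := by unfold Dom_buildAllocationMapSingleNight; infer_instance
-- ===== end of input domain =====

-- B replaces A's four quarter slice-fill loops (including the dead zero-writing else
-- branch) by one per-position pass computing each slot from its quarter index; same values, not faster.


-- ===== PORT A =====
-- literal port of A: q = int(avail/4) and edge = int((len-avail)/2) truncate toward zero
-- (PySem.Int.truncdiv, exact on |·| ≤ 2^31); allomap[j] = v is PySem.List.pySetD (negative j
-- writes from the end as in Python; where Python would raise IndexError, excluded by Pre_,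
-- pySetD leaves the list unchanged).
def buildAllocationMapSingleNight (An : List Int) (AvailableSlotsInTheNight : Int) (twilightMapNight : List Int) : List Int :=
  let _extra := PySem.Int.mod AvailableSlotsInTheNight 4
  let q := PySem.Int.truncdiv AvailableSlotsInTheNight 4
  let edge := PySem.Int.truncdiv ((twilightMapNight.length : Int) - AvailableSlotsInTheNight) 2
  let allomap := List.replicate twilightMapNight.length (0 : Int)
  (List.range An.length).foldl (fun acc (i : Nat) =>
    if An[i]! = 1 then
      let start := edge + (i : Int) * q
      let stop := start + q
      (PySem.List.pyRange start stop 1).foldl (fun a j => PySem.List.pySetD a j 1) acc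
    else
      let start := edge + (i : Int) * q
      let stop0 := start + q
      let stop := if i = 3 then stop0 - 1 else stop0
      (PySem.List.pyRange start stop 1).foldl (fun a j => PySem.List.pySetD a j 0) acc) allomap

-- ===== PORT B =====
-- literal port of Source B: one comprehension over output positions; An[(j-edge)//q] is
-- PySem.List.pyGetD (the guard makes the index in range, so the default is never used).
def buildAllocationMapSingleNight_alt (An : List Int) (AvailableSlotsInTheNight : Int) (twilightMapNight : List Int) : List Int :=
  let q := PySem.Int.truncdiv AvailableSlotsInTheNight 4
  let edge := PySem.Int.truncdiv ((twilightMapNight.length : Int) - AvailableSlotsInTheNight) 2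
  let hi := edge + (An.length : Int) * q
  (PySem.List.pyRange 0 (twilightMapNight.length : Int) 1).map (fun j =>
    if q ≤ 0 ∨ j < edge ∨ hi ≤ j then (0 : Int)
    else if PySem.List.pyGetD An (PySem.Int.floordiv (j - edge) q) 0 = 1 then 1 else 0)

-- ===== PRECONDITION & SPEC =====
-- Pre_ excludes inputs on which some write index leaves [-len, len) — there A raises
-- IndexError — and inputs on which an allocated (An[k] = 1) quarter starts below 0 — there
-- Python's negative indexing silently wraps the written 1s to the end of the map, an
-- artefact of A's in-place writes on a nonsensical configuration (more allocated slots than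
-- the night holds). Wrapped zero-writes are harmless and stay inside Pre_.
def Pre_buildAllocationMapSingleNight (An : List Int) (AvailableSlotsInTheNight : Int) (twilightMapNight : List Int) : Prop :=
  ∀ k < An.length,
    (let q := PySem.Int.truncdiv AvailableSlotsInTheNight 4
     let edge := PySem.Int.truncdiv ((twilightMapNight.length : Int) - AvailableSlotsInTheNight) 2
     let lo := edge + (k : Int) * q
     let hi := lo + q - (if An[k]! ≠ 1 ∧ k = 3 then 1 else 0)
     hi ≤ lo ∨
       (if An[k]! = 1 then 0 ≤ lo ∧ hi ≤ (twilightMapNight.length : Int)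
        else -(twilightMapNight.length : Int) ≤ lo ∧ hi ≤ (twilightMapNight.length : Int)))
instance (An : List Int) (AvailableSlotsInTheNight : Int) (twilightMapNight : List Int) : Decidable (Pre_buildAllocationMapSingleNight An AvailableSlotsInTheNight twilightMapNight) := by unfold Pre_buildAllocationMapSingleNight; infer_instance

def pvWitness_buildAllocationMapSingleNight : List Int × Int × List Int :=
  ([1, 0, 1, 0], 8, [0, 0, 0, 0, 0, 0, 0, 0, 0, 0, 0, 0])

def Spec_buildAllocationMapSingleNight (An : List Int) (AvailableSlotsInTheNight : Int) (twilightMapNight : List Int) (out : List Int) : Prop := out = buildAllocationMapSingleNight_alt An AvailableSlotsInTheNight twilightMapNight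
instance (An : List Int) (AvailableSlotsInTheNight : Int) (twilightMapNight : List Int) (out : List Int) : Decidable (Spec_buildAllocationMapSingleNight An AvailableSlotsInTheNight twilightMapNight out) := by unfold Spec_buildAllocationMapSingleNight; infer_instance

-- ===== CLAIM (what is proved, stated in full; the proofs are below) =====
def Claim_equal_buildAllocationMapSingleNight : Prop := ∀ (An : List Int) (AvailableSlotsInTheNight : Int) (twilightMapNight : List Int), Dom_buildAllocationMapSingleNight An AvailableSlotsInTheNight twilightMapNight → Pre_buildAllocationMapSingleNight An AvailableSlotsInTheNight twilightMapNight → Spec_buildAllocationMapSingleNight An AvailableSlotsInTheNight twilightMapNight (buildAllocationMapSingleNight An AvailableSlotsInTheNight twilightMapNight)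

-- ===== LEMMAS AND PROOFS =====

-- the body of A's outer loop, named for the proofs
def stepA (q edge : Int) (An : List Int) (acc : List Int) (i : Nat) : List Int :=
  if An[i]! = 1 then
    let start := edge + (i : Int) * q
    let stop := start + q
    (PySem.List.pyRange start stop 1).foldl (fun a j => PySem.List.pySetD a j 1) acc
  else
    let start := edge + (i : Int) * q
    let stop0 := start + q
    let stop := if i = 3 then stop0 - 1 else stop0
    (PySem.List.pyRange start stop 1).foldl (fun a j => PySem.List.pySetD a j 0) acc

theorem portA_eq (An : List Int) (avail : Int) (twil : List Int) :
    buildAllocationMapSingleNight An avail twil =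
      (List.range An.length).foldl
        (stepA (PySem.Int.truncdiv avail 4)
               (PySem.Int.truncdiv ((twil.length : Int) - avail) 2) An)
        (List.replicate twil.length 0) := rfl

-- the per-position value after processing the first m quarters
def valF (An : List Int) (q edge : Int) (m : Nat) (p : Int) : Int :=
  if edge ≤ p ∧ p < edge + (m : Int) * q ∧
      PySem.List.pyGetD An (PySem.Int.floordiv (p - edge) q) 0 = 1 then 1 else 0

theorem length_setFold (v : Int) (l : List Int) (acc : List Int) :
    (l.foldl (fun a j => PySem.List.pySetD a j v) acc).length = acc.length := by
  induction l generalizing acc with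
  | nil => rfl
  | cons x xs ih => simpa [PySem.List.length_pySetD] using ih (PySem.List.pySetD acc x v)

theorem stepA_length (q edge : Int) (An acc : List Int) (i : Nat) :
    (stepA q edge An acc i).length = acc.length := by
  unfold stepA; split <;> exact length_setFold _ _ _

theorem foldA_length (q edge : Int) (An : List Int) :
    ∀ (m : Nat) (acc : List Int),
      ((List.range m).foldl (stepA q edge An) acc).length = acc.length := by
  intro m
  induction m with
  | zero => intro acc; rfl
  | succ k ih =>
      intro acc
      rw [List.range_succ, List.foldl_append, List.foldl_cons, List.foldl_nil, stepA_length]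
      exact ih acc

-- getElem? after writing v over [a, b) when the range is within bounds
theorem setFold_getElem? (v b : Int) (d : Nat) : ∀ (a : Int) (acc : List Int),
    (b - a).toNat ≤ d → 0 ≤ a → b ≤ (acc.length : Int) → ∀ p : Nat,
    ((PySem.List.pyRange a b 1).foldl (fun x j => PySem.List.pySetD x j v) acc)[p]? =
      if a ≤ (p : Int) ∧ (p : Int) < b then some v else acc[p]? := by
  induction d with
  | zero =>
      intro a acc hd ha hb p
      have hba : b ≤ a := by omega
      rw [PySem.List.pyRange_one_eq_nil hba, List.foldl_nil, if_neg (by omega)]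
  | succ k ih =>
      intro a acc hd ha hb p
      by_cases hab : b ≤ a
      · rw [PySem.List.pyRange_one_eq_nil hab, List.foldl_nil, if_neg (by omega)]
      · rw [Int.not_le] at hab
        rw [PySem.List.pyRange_one_cons hab, List.foldl_cons,
            ih (a + 1) (PySem.List.pySetD acc a v) (by omega) (by omega)
              (by rw [PySem.List.length_pySetD]; exact hb) p]
        rw [PySem.List.pySetD_of_nonneg acc v ha]
        by_cases hpa : (p : Int) = a
        · have h1 : ¬ (a + 1 ≤ (p : Int) ∧ (p : Int) < b) := by omega
          have h2 : a ≤ (p : Int) ∧ (p : Int) < b := by omega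
          rw [if_neg h1, if_pos h2, List.getElem?_set,
              if_pos (by omega), if_pos (by omega)]
        · by_cases hin : a + 1 ≤ (p : Int) ∧ (p : Int) < b
          · rw [if_pos hin, if_pos (by omega)]
          · rw [if_neg hin, if_neg (by omega), List.getElem?_set, if_neg (by omega)]

theorem valF_succ_out (An : List Int) (q edge : Int) (hq : 0 < q) (m : Nat) (p : Int)
    (hout : ¬ (edge + (m : Int) * q ≤ p ∧ p < edge + (m : Int) * q + q)) :
    valF An q edge (m + 1) p = valF An q edge m p := by
  unfold valF
  have hmul : ((m + 1 : Nat) : Int) * q = (m : Int) * q + q := by push_cast; ring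
  rw [hmul]
  have hiff : (edge ≤ p ∧ p < edge + ((m : Int) * q + q) ∧
        PySem.List.pyGetD An (PySem.Int.floordiv (p - edge) q) 0 = 1) ↔
      (edge ≤ p ∧ p < edge + (m : Int) * q ∧
        PySem.List.pyGetD An (PySem.Int.floordiv (p - edge) q) 0 = 1) := by
    constructor <;> rintro ⟨a, b, c⟩ <;> exact ⟨a, by omega, c⟩
  rw [if_congr hiff rfl rfl]

theorem valF_succ_in (An : List Int) (q edge : Int) (hq : 0 < q) (m : Nat)
    (hm : m < An.length) (p : Int)
    (hin : edge + (m : Int) * q ≤ p ∧ p < edge + (m : Int) * q + q) :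
    valF An q edge (m + 1) p = if An[m]! = 1 then 1 else 0 := by
  unfold valF
  have hmq : 0 ≤ (m : Int) * q := mul_nonneg (by positivity) hq.le
  have hmul : ((m + 1 : Nat) : Int) * q = (m : Int) * q + q := by push_cast; ring
  have hfd : PySem.Int.floordiv (p - edge) q = (m : Int) := by
    rw [PySem.Int.floordiv_eq_iff_of_pos hq]
    constructor
    · omega
    · have : ((m : Int) + 1) * q = (m : Int) * q + q := by ring
      omega
  have hget : PySem.List.pyGetD An (PySem.Int.floordiv (p - edge) q) 0 = An[m]! := by
    rw [hfd]
    rw [PySem.List.pyGetD_natCast, List.getD_eq_getElem _ _ hm, getElem!_pos An m hm]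
  rw [hmul, hget]
  by_cases h1 : An[m]! = 1
  · rw [if_pos h1, if_pos ⟨by omega, by omega, h1⟩]
  · rw [if_neg h1, if_neg (by intro h; exact h1 h.2.2)]

theorem valF_out (An : List Int) (q edge : Int) (m : Nat) (p : Int)
    (hge : edge + (m : Int) * q ≤ p) : valF An q edge m p = 0 := by
  unfold valF
  rw [if_neg (by omega)]

theorem getElem?_pySetD (xs : List Int) (i v : Int)
    (hge : -(xs.length : Int) ≤ i) (hlt : i < (xs.length : Int)) (p : Nat) :
    (PySem.List.pySetD xs i v)[p]? =
      if (0 ≤ i ∧ (p : Int) = i) ∨ (i < 0 ∧ (p : Int) = i + (xs.length : Int))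
      then some v else xs[p]? := by
  by_cases h0 : 0 ≤ i
  · rw [PySem.List.pySetD_of_nonneg xs v h0, List.getElem?_set]
    by_cases he : i.toNat = p
    · rw [if_pos he, if_pos (by omega), if_pos (Or.inl ⟨h0, by omega⟩)]
    · rw [if_neg he, if_neg (by omega)]
  · have hneg : PySem.List.pySetD xs i v = xs.set (xs.length - (-i).toNat) v := by
      simp only [PySem.List.pySetD, PySem.List.pySet?, PySem.List.pyIdx?]
      rw [if_neg h0, if_pos hge]
      rfl
    rw [hneg, List.getElem?_set]
    by_cases he : xs.length - (-i).toNat = p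
    · rw [if_pos he, if_pos (by omega), if_pos (Or.inr ⟨by omega, by omega⟩)]
    · rw [if_neg he, if_neg (by omega)]

-- writing v over [a, b) with Python index semantics: negative indices wrap to the end
theorem setFold_getElem?_wrap (v b : Int) (d : Nat) : ∀ (a : Int) (acc : List Int),
    (b - a).toNat ≤ d → -(acc.length : Int) ≤ a → b ≤ (acc.length : Int) → ∀ p : Nat,
    ((PySem.List.pyRange a b 1).foldl (fun x j => PySem.List.pySetD x j v) acc)[p]? =
      if (a ≤ (p : Int) ∧ (p : Int) < b) ∨
         (a ≤ (p : Int) - (acc.length : Int) ∧ (p : Int) - (acc.length : Int) < b ∧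
          (p : Int) < (acc.length : Int))
      then some v else acc[p]? := by
  induction d with
  | zero =>
      intro a acc hd ha hb p
      have hba : b ≤ a := by omega
      rw [PySem.List.pyRange_one_eq_nil hba, List.foldl_nil, if_neg (by omega)]
  | succ k ih =>
      intro a acc hd ha hb p
      by_cases hab : b ≤ a
      · rw [PySem.List.pyRange_one_eq_nil hab, List.foldl_nil, if_neg (by omega)]
      · rw [Int.not_le] at hab
        rw [PySem.List.pyRange_one_cons hab, List.foldl_cons,
            ih (a + 1) (PySem.List.pySetD acc a v) (by omega)
              (by rw [PySem.List.length_pySetD]; omega)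
              (by rw [PySem.List.length_pySetD]; exact hb) p,
            PySem.List.length_pySetD,
            getElem?_pySetD acc a v (by omega) (by omega) p]
        by_cases hC1 : (a + 1 ≤ (p : Int) ∧ (p : Int) < b) ∨
            (a + 1 ≤ (p : Int) - (acc.length : Int) ∧ (p : Int) - (acc.length : Int) < b ∧
             (p : Int) < (acc.length : Int))
        · rw [if_pos hC1, if_pos (by omega)]
        · rw [if_neg hC1]
          by_cases hT : (0 ≤ a ∧ (p : Int) = a) ∨ (a < 0 ∧ (p : Int) = a + (acc.length : Int))
          · rw [if_pos hT, if_pos (by omega)]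
          · rw [if_neg hT, if_neg (by omega)]

theorem valF_succ_ge (An : List Int) (q edge : Int) (hq : 0 < q) (m : Nat)
    (hm : m < An.length) (h1 : An[m]! ≠ 1) (p : Int)
    (hge : edge + (m : Int) * q ≤ p) : valF An q edge (m + 1) p = 0 := by
  by_cases hlt : p < edge + (m : Int) * q + q
  · rw [valF_succ_in An q edge hq m hm p ⟨hge, hlt⟩, if_neg h1]
  · unfold valF
    have hmul : ((m + 1 : Nat) : Int) * q = (m : Int) * q + q := by push_cast; ring
    rw [hmul, if_neg (by rintro ⟨-, h2, -⟩; omega)]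

-- main invariant of A's outer loop (allocated band case, q > 0)
theorem foldA_inv (An : List Int) (q edge : Int) (n : Nat) (hq : 0 < q)
    (hpre : ∀ k < An.length,
      edge + (k : Int) * q + q - (if An[k]! ≠ 1 ∧ k = 3 then 1 else 0) ≤ edge + (k : Int) * q ∨
      (if An[k]! = 1 then
        0 ≤ edge + (k : Int) * q ∧
        edge + (k : Int) * q + q - (if An[k]! ≠ 1 ∧ k = 3 then 1 else 0) ≤ (n : Int)
       else
        -(n : Int) ≤ edge + (k : Int) * q ∧
        edge + (k : Int) * q + q - (if An[k]! ≠ 1 ∧ k = 3 then 1 else 0) ≤ (n : Int))) :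
    ∀ m, m ≤ An.length → ∀ p : Nat, p < n →
      ((List.range m).foldl (stepA q edge An) (List.replicate n (0 : Int)))[p]? =
        some (valF An q edge m (p : Int)) := by
  intro m
  induction m with
  | zero =>
      intro _ p hp
      rw [List.range_zero, List.foldl_nil, List.getElem?_replicate, if_pos hp]
      unfold valF
      rw [if_neg (by push_cast; omega)]
  | succ m ih =>
      intro hm p hp
      have hmlen : m < An.length := by omega
      rw [List.range_succ, List.foldl_append, List.foldl_cons, List.foldl_nil]
      set L := (List.range m).foldl (stepA q edge An) (List.replicate n (0 : Int)) with hLdef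
      have hlen : L.length = n := by
        rw [hLdef, foldA_length, List.length_replicate]
      have hIH := ih (by omega) p hp
      have hpm := hpre m hmlen
      by_cases h1 : An[m]! = 1
      · have hstep : stepA q edge An L m =
            (PySem.List.pyRange (edge + (m : Int) * q) (edge + (m : Int) * q + q) 1).foldl
              (fun a j => PySem.List.pySetD a j 1) L := by
          unfold stepA; rw [if_pos h1]
        rw [hstep]
        have hif : (if An[m]! ≠ 1 ∧ m = 3 then (1 : Int) else 0) = 0 := by
          rw [if_neg (by simp [h1])]
        rw [hif, if_pos h1] at hpm
        have hbnd : 0 ≤ edge + (m : Int) * q ∧ edge + (m : Int) * q + q ≤ (n : Int) := by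
          rcases hpm with h | h
          · omega
          · omega
        rw [setFold_getElem? 1 (edge + (m : Int) * q + q) q.toNat (edge + (m : Int) * q) _
              (by omega) hbnd.1 (by rw [hlen]; exact hbnd.2) p]
        by_cases hin : edge + (m : Int) * q ≤ (p : Int) ∧ (p : Int) < edge + (m : Int) * q + q
        · rw [if_pos hin, valF_succ_in An q edge hq m hmlen _ hin, if_pos h1]
        · rw [if_neg hin, hIH, valF_succ_out An q edge hq m _ hin]
      · have hstep : stepA q edge An L m =
            (PySem.List.pyRange (edge + (m : Int) * q)
              (if m = 3 then edge + (m : Int) * q + q - 1 else edge + (m : Int) * q + q) 1).foldl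
              (fun a j => PySem.List.pySetD a j 0) L := by
          unfold stepA; rw [if_neg h1]
        rw [hstep]
        have hif : (if An[m]! ≠ 1 ∧ m = 3 then (1 : Int) else 0) = (if m = 3 then 1 else 0) := by
          by_cases h3 : m = 3
          · rw [if_pos ⟨h1, h3⟩, if_pos h3]
          · rw [if_neg (by tauto), if_neg h3]
        rw [hif, if_neg h1] at hpm
        have hstop : (if m = 3 then edge + (m : Int) * q + q - 1 else edge + (m : Int) * q + q) =
            edge + (m : Int) * q + q - (if m = 3 then 1 else 0) := by
          by_cases h3 : m = 3 <;> simp [h3]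
        have hc01 : (0 : Int) ≤ (if m = 3 then (1 : Int) else 0) ∧ (if m = 3 then (1 : Int) else 0) ≤ 1 := by
          by_cases h3 : m = 3 <;> simp [h3]
        rw [hstop]
        by_cases hge : edge + (m : Int) * q ≤ (p : Int)
        · -- at or beyond this quarter's start: both sides are 0
          rw [valF_succ_ge An q edge hq m hmlen h1 _ hge]
          by_cases hemp : edge + (m : Int) * q + q - (if m = 3 then 1 else 0) ≤ edge + (m : Int) * q
          · rw [PySem.List.pyRange_one_eq_nil hemp, List.foldl_nil, hIH,
                valF_out An q edge m _ hge]
          · have hbnd : -(n : Int) ≤ edge + (m : Int) * q ∧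
                edge + (m : Int) * q + q - (if m = 3 then 1 else 0) ≤ (n : Int) := by
              rcases hpm with h | h
              · omega
              · omega
            rw [setFold_getElem?_wrap 0 (edge + (m : Int) * q + q - (if m = 3 then 1 else 0))
                  q.toNat (edge + (m : Int) * q) L (by omega) (by rw [hlen]; exact hbnd.1)
                  (by rw [hlen]; exact hbnd.2) p, hlen]
            by_cases hwr : (edge + (m : Int) * q ≤ (p : Int) ∧
                  (p : Int) < edge + (m : Int) * q + q - (if m = 3 then 1 else 0)) ∨
                (edge + (m : Int) * q ≤ (p : Int) - (n : Int) ∧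
                  (p : Int) - (n : Int) < edge + (m : Int) * q + q - (if m = 3 then 1 else 0) ∧
                  (p : Int) < (n : Int))
            · rw [if_pos hwr]
            · rw [if_neg hwr, hIH, valF_out An q edge m _ hge]
        · -- before this quarter's start: nothing this step touches p
          rw [Int.not_le] at hge
          rw [valF_succ_out An q edge hq m _ (by omega), ← hIH]
          by_cases hemp : edge + (m : Int) * q + q - (if m = 3 then 1 else 0) ≤ edge + (m : Int) * q
          · rw [PySem.List.pyRange_one_eq_nil hemp, List.foldl_nil]
          · have hbnd : -(n : Int) ≤ edge + (m : Int) * q ∧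
                edge + (m : Int) * q + q - (if m = 3 then 1 else 0) ≤ (n : Int) := by
              rcases hpm with h | h
              · omega
              · omega
            rw [setFold_getElem?_wrap 0 (edge + (m : Int) * q + q - (if m = 3 then 1 else 0))
                  q.toNat (edge + (m : Int) * q) L (by omega) (by rw [hlen]; exact hbnd.1)
                  (by rw [hlen]; exact hbnd.2) p, hlen]
            rw [if_neg (by omega)]

-- with q ≤ 0 every write range is empty: A returns the untouched zero map
theorem stepA_id (q edge : Int) (An acc : List Int) (i : Nat) (hq : q ≤ 0) :
    stepA q edge An acc i = acc := by
  by_cases h1 : An[i]! = 1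
  · have hstep : stepA q edge An acc i =
        (PySem.List.pyRange (edge + (i : Int) * q) (edge + (i : Int) * q + q) 1).foldl
          (fun a j => PySem.List.pySetD a j 1) acc := by
      unfold stepA; rw [if_pos h1]
    rw [hstep, PySem.List.pyRange_one_eq_nil (by omega), List.foldl_nil]
  · have hstep : stepA q edge An acc i =
        (PySem.List.pyRange (edge + (i : Int) * q)
          (if i = 3 then edge + (i : Int) * q + q - 1 else edge + (i : Int) * q + q) 1).foldl
          (fun a j => PySem.List.pySetD a j 0) acc := by
      unfold stepA; rw [if_neg h1]
    have hle : (if i = 3 then edge + (i : Int) * q + q - 1 else edge + (i : Int) * q + q) ≤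
        edge + (i : Int) * q := by
      by_cases h3 : i = 3
      · rw [if_pos h3]; omega
      · rw [if_neg h3]; omega
    rw [hstep, PySem.List.pyRange_one_eq_nil hle, List.foldl_nil]

theorem foldA_id (q edge : Int) (An : List Int) (hq : q ≤ 0) :
    ∀ (m : Nat) (acc : List Int), (List.range m).foldl (stepA q edge An) acc = acc := by
  intro m
  induction m with
  | zero => intro acc; rfl
  | succ k ih =>
      intro acc
      rw [List.range_succ, List.foldl_append, List.foldl_cons, List.foldl_nil,
          stepA_id q edge An _ _ hq, ih]

theorem foldA_eq_map (An : List Int) (q edge : Int) (n : Nat)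
    (hpre : ∀ k < An.length,
      edge + (k : Int) * q + q - (if An[k]! ≠ 1 ∧ k = 3 then 1 else 0) ≤ edge + (k : Int) * q ∨
      (if An[k]! = 1 then
        0 ≤ edge + (k : Int) * q ∧
        edge + (k : Int) * q + q - (if An[k]! ≠ 1 ∧ k = 3 then 1 else 0) ≤ (n : Int)
       else
        -(n : Int) ≤ edge + (k : Int) * q ∧
        edge + (k : Int) * q + q - (if An[k]! ≠ 1 ∧ k = 3 then 1 else 0) ≤ (n : Int))) :
    (List.range An.length).foldl (stepA q edge An) (List.replicate n 0) =
      (PySem.List.pyRange 0 (n : Int) 1).map (fun j =>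
        if q ≤ 0 ∨ j < edge ∨ edge + (An.length : Int) * q ≤ j then (0 : Int)
        else if PySem.List.pyGetD An (PySem.Int.floordiv (j - edge) q) 0 = 1 then 1 else 0) := by
  apply List.ext_getElem?
  intro p
  by_cases hp : p < n
  · rw [PySem.List.getElem?_map_pyRange_zero _ n p hp]
    by_cases hq : 0 < q
    · rw [foldA_inv An q edge n hq hpre An.length le_rfl p hp]
      refine congrArg some ?_
      show valF An q edge An.length (p : Int) =
        if q ≤ 0 ∨ (p : Int) < edge ∨ edge + (An.length : Int) * q ≤ (p : Int) then (0 : Int)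
        else if PySem.List.pyGetD An (PySem.Int.floordiv ((p : Int) - edge) q) 0 = 1 then 1 else 0
      unfold valF
      by_cases hband : edge ≤ (p : Int) ∧ (p : Int) < edge + (An.length : Int) * q
      · rw [if_neg (show ¬ (q ≤ 0 ∨ (p : Int) < edge ∨
            edge + (An.length : Int) * q ≤ (p : Int)) from by omega)]
        by_cases hx : PySem.List.pyGetD An (PySem.Int.floordiv ((p : Int) - edge) q) 0 = 1
        · rw [if_pos ⟨hband.1, hband.2, hx⟩, if_pos hx]
        · rw [if_neg (fun h => hx h.2.2), if_neg hx]
      · rw [if_neg (fun h => hband ⟨h.1, h.2.1⟩),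
            if_pos (show q ≤ 0 ∨ (p : Int) < edge ∨
              edge + (An.length : Int) * q ≤ (p : Int) from by omega)]
    · rw [Int.not_lt] at hq
      rw [foldA_id q edge An hq, List.getElem?_replicate, if_pos hp, if_pos (Or.inl hq)]
  · rw [List.getElem?_eq_none (by rw [foldA_length, List.length_replicate]; omega),
        List.getElem?_eq_none (by rw [List.length_map, PySem.List.length_pyRange_one]; omega)]

-- ===== VERDICT (by name: the statement is the Claim_ definition above) =====
theorem buildAllocationMapSingleNight_spec : Claim_equal_buildAllocationMapSingleNight := by
  intro An avail twil _ hpre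
  unfold Pre_buildAllocationMapSingleNight at hpre
  unfold Spec_buildAllocationMapSingleNight
  rw [portA_eq]
  exact foldA_eq_map An (PySem.Int.truncdiv avail 4)
    (PySem.Int.truncdiv ((twil.length : Int) - avail) 2) twil.length hpre
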